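-- pv_equiv track=rewrite | github.com/Flacarel/Python-Bombica-Sebastian-3E2 | Lab1/munca_lab2.py | primul_ultimul_caracter
-- ===== SOURCE A (Python) =====
-- def primul_ultimul_caracter(propozitie):
--     rezultat = ""
--     inceput_cuvant = True
--     primul = ""
--     ultimul = ""
--
--     for i in range(len(propozitie)):
--         caracter = propozitie[i]
--
--         if caracter.isalnum():
--             if inceput_cuvant:
--                 primul = caracter
--                 inceput_cuvant = False
--             ultimul = caracter
--         else:
--             if not inceput_cuvant:
--                 rezultat += primul + " " + ultimul + " "
--             inceput_cuvant = True
--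
--     if not inceput_cuvant:
--         rezultat += primul + " " + ultimul
--
--     return rezultat.strip()
-- ===== SOURCE B (Python) =====
-- def primul_ultimul_caracter(propozitie):
--     # Stage 1: tokenize into maximal alnum runs; Stage 2: map to "first last"; Stage 3: join.
--     words = []
--     cur = ""
--     for c in propozitie:
--         if c.isalnum():
--             cur += c
--         else:
--             if cur:
--                 words.append(cur)
--                 cur = ""
--     if cur:
--         words.append(cur)
--     return " ".join(w[0] + " " + w[-1] for w in words)
-- ===== Notes on version B (the rewrite author's own statement) =====
-- stated objective: simpler
-- what changed: Replaces A's fused single pass with inceput_cuvant/primul/ultimul sentinels, incremental string concatenation and a final strip by a tokenize-then-map-then-join decomposition: segment the string into maximal alnum runs, map each word to its first and last characters separated by a space, then join the pieces with single spaces (no strip needed).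
import Mathlib
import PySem

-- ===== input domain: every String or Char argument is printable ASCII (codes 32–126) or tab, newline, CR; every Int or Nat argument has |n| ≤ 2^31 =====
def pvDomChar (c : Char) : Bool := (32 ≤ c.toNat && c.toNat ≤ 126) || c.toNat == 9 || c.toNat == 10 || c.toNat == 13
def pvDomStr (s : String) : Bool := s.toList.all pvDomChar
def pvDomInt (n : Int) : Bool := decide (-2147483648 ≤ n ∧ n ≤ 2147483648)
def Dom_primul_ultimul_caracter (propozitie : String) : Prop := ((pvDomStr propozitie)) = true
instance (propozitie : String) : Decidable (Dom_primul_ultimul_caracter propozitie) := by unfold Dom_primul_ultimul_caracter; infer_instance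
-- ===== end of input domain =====

-- B replaces A's fused sentinel-driven pass (+ final strip) by tokenize-then-map-then-join; objective: simpler.

-- ===== PORT A =====
-- state = (rezultat, inceput_cuvant, primul, ultimul); one step of A's for-loop body
def pvAStep (st : List Char × Bool × List Char × List Char) (caracter : Char) :
    List Char × Bool × List Char × List Char :=
  let (rezultat, inceput_cuvant, primul, ultimul) := st
  if PySem.Chars.isalnum caracter then
    (rezultat, false, (if inceput_cuvant then [caracter] else primul), [caracter])
  else
    ((if !inceput_cuvant then rezultat ++ primul ++ [' '] ++ ultimul ++ [' '] else rezultat),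
     true, primul, ultimul)

def primul_ultimul_caracter (propozitie : String) : String :=
  let st := propozitie.toList.foldl pvAStep ([], true, [], [])
  let rezultat := if !st.2.1 then st.1 ++ st.2.2.1 ++ [' '] ++ st.2.2.2 else st.1
  String.ofList (PySem.Chars.strip rezultat)

-- ===== PORT B =====
-- state = (words, cur); one step of B's tokenizing for-loop body
def pvBStep (st : List (List Char) × List Char) (c : Char) : List (List Char) × List Char :=
  if PySem.Chars.isalnum c then (st.1, st.2 ++ [c])
  else (if st.2 ≠ [] then st.1 ++ [st.2] else st.1, [])

def pvWords (cs : List Char) : List (List Char) :=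
  let st := cs.foldl pvBStep ([], [])
  if st.2 ≠ [] then st.1 ++ [st.2] else st.1

-- w[0] + " " + w[-1]  (words produced by pvWords are nonempty, so the defaults are never used)
def pvPair (w : List Char) : List Char := [w.headD ' ', ' ', w.getLastD ' ']

def primul_ultimul_caracter_alt (propozitie : String) : String :=
  String.ofList (PySem.Chars.join [' '] ((pvWords propozitie.toList).map pvPair))

-- ===== PRECONDITION & SPEC =====
def Spec_primul_ultimul_caracter (propozitie : String) (out : String) : Prop := out = primul_ultimul_caracter_alt propozitie
instance (propozitie : String) (out : String) : Decidable (Spec_primul_ultimul_caracter propozitie out) := by unfold Spec_primul_ultimul_caracter; infer_instance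

-- ===== CLAIM (what is proved, stated in full; the proofs are below) =====
def Claim_equal_primul_ultimul_caracter : Prop := ∀ (propozitie : String), Dom_primul_ultimul_caracter propozitie → Spec_primul_ultimul_caracter propozitie (primul_ultimul_caracter propozitie)

-- ===== LEMMAS AND PROOFS =====

-- A's rezultat after having closed exactly the words ws: "h l " per word
def pvEmit (ws : List (List Char)) : List Char :=
  ws.flatMap (fun w => [w.headD ' ', ' ', w.getLastD ' ', ' '])

-- well-formed word lists: nonempty, all-alnum words
def pvGoodW (ws : List (List Char)) : Prop :=
  ∀ w ∈ ws, w ≠ [] ∧ ∀ c ∈ w, PySem.Chars.isalnum c = true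

theorem pv_char_le {a c : Char} (h : a ≤ c) : a.toNat ≤ c.toNat := h

theorem pv_alnum_not_space {c : Char} (h : PySem.Chars.isalnum c = true) :
    PySem.Chars.isspace c = false := by
  simp [PySem.Chars.isalnum, PySem.Chars.isalpha, PySem.Chars.isupper, PySem.Chars.islower,
    PySem.Chars.isdigit] at h
  simp [PySem.Chars.isspace]
  have eA : ('A').toNat = 65 := rfl
  have eZ : ('Z').toNat = 90 := rfl
  have ea : ('a').toNat = 97 := rfl
  have ez : ('z').toNat = 122 := rfl
  have e0 : ('0').toNat = 48 := rfl
  have e9 : ('9').toNat = 57 := rfl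
  rcases h with (⟨h1, h2⟩ | ⟨h1, h2⟩) | ⟨h1, h2⟩ <;>
    · have g1 := pv_char_le h1
      have g2 := pv_char_le h2
      omega

theorem pv_emit_snoc (ws : List (List Char)) (w : List Char) :
    pvEmit (ws ++ [w]) = pvEmit ws ++ [w.headD ' ', ' ', w.getLastD ' ', ' '] := by
  simp [pvEmit]

-- the loop invariant: A's fold state tracks B's fold state
theorem pv_loop_inv (cs : List Char) (ws : List (List Char)) (cur P U : List Char)
    (hPU : cur ≠ [] → P = [cur.headD ' '] ∧ U = [cur.getLastD ' ']) :
    ∃ P' U',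
      cs.foldl pvAStep (pvEmit ws, cur.isEmpty, P, U) =
        (pvEmit (cs.foldl pvBStep (ws, cur)).1, (cs.foldl pvBStep (ws, cur)).2.isEmpty, P', U')
      ∧ ((cs.foldl pvBStep (ws, cur)).2 ≠ [] →
          P' = [(cs.foldl pvBStep (ws, cur)).2.headD ' '] ∧
          U' = [(cs.foldl pvBStep (ws, cur)).2.getLastD ' ']) := by
  induction cs generalizing ws cur P U with
  | nil => exact ⟨P, U, rfl, hPU⟩
  | cons c cs ih =>
    simp only [List.foldl_cons]
    by_cases hc : PySem.Chars.isalnum c = true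
    · have hA : pvAStep (pvEmit ws, cur.isEmpty, P, U) c =
          (pvEmit ws, (cur ++ [c]).isEmpty, [(cur ++ [c]).headD ' '], [(cur ++ [c]).getLastD ' ']) := by
        cases cur with
        | nil => simp [pvAStep, hc]
        | cons a t =>
          obtain ⟨hP, hU⟩ := hPU (by simp)
          have h2 : (a :: (t ++ [c])).getLast?.getD ' ' = c := by
            rw [← List.cons_append, List.getLast?_concat]; rfl
          simp [pvAStep, hc, hP, h2]
      have hB : pvBStep (ws, cur) c = (ws, cur ++ [c]) := by simp [pvBStep, hc]
      rw [hA, hB]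
      exact ih ws (cur ++ [c]) _ _ (fun _ => ⟨rfl, rfl⟩)

    · cases cur with
      | nil =>
        have hA : pvAStep (pvEmit ws, (([] : List Char)).isEmpty, P, U) c =
            (pvEmit ws, (([] : List Char)).isEmpty, P, U) := by simp [pvAStep, hc]
        have hB : pvBStep (ws, ([] : List Char)) c = (ws, []) := by simp [pvBStep, hc]
        rw [hA, hB]
        exact ih ws [] P U hPU
      | cons a t =>
        obtain ⟨hP, hU⟩ := hPU (by simp)
        have hA : pvAStep (pvEmit ws, ((a :: t)).isEmpty, P, U) c =
            (pvEmit (ws ++ [a :: t]), (([] : List Char)).isEmpty, P, U) := by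
          simp [pvAStep, hc, hP, hU, pv_emit_snoc]
        have hB : pvBStep (ws, a :: t) c = (ws ++ [a :: t], []) := by simp [pvBStep, hc]
        rw [hA, hB]
        exact ih (ws ++ [a :: t]) [] P U (by simp)
  
-- the goodness invariant of B's fold
theorem pv_good_inv (cs : List Char) (ws : List (List Char)) (cur : List Char)
    (hws : pvGoodW ws) (hcur : ∀ c ∈ cur, PySem.Chars.isalnum c = true) :
    pvGoodW (cs.foldl pvBStep (ws, cur)).1 ∧
      ∀ c ∈ (cs.foldl pvBStep (ws, cur)).2, PySem.Chars.isalnum c = true := by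
  induction cs generalizing ws cur with
  | nil => exact ⟨hws, hcur⟩
  | cons c cs ih =>
    simp only [List.foldl_cons]
    by_cases hc : PySem.Chars.isalnum c = true
    · rw [show pvBStep (ws, cur) c = (ws, cur ++ [c]) by simp [pvBStep, hc]]
      refine ih ws (cur ++ [c]) hws ?_
      intro x hx
      rcases List.mem_append.1 hx with h | h
      · exact hcur x h
      · simpa using (List.mem_singleton.1 h) ▸ hc
    · cases cur with
      | nil =>
        rw [show pvBStep (ws, ([] : List Char)) c = (ws, []) by simp [pvBStep, hc]]
        exact ih ws [] hws (by simp)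
      | cons a t =>
        rw [show pvBStep (ws, a :: t) c = (ws ++ [a :: t], []) by simp [pvBStep, hc]]
        refine ih (ws ++ [a :: t]) [] ?_ (by simp)
        intro w hw
        rcases List.mem_append.1 hw with h | h
        · exact hws w h
        · rw [List.mem_singleton.1 h]
          exact ⟨by simp, hcur⟩

theorem pv_join_snoc (xs : List (List Char)) (x : List Char) :
    PySem.Chars.join [' '] (xs ++ [x]) =
      if xs = [] then x else PySem.Chars.join [' '] xs ++ [' '] ++ x := by
  induction xs with
  | nil => simp [PySem.Chars.join_singleton]
  | cons a xs ih =>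
    cases xs with
    | nil => simp [PySem.Chars.join_cons_cons, PySem.Chars.join_singleton]
    | cons b ys =>
      have h1 : (a :: b :: ys) ++ [x] = a :: ((b :: ys) ++ [x]) := by simp
      rw [h1, show (b :: ys) ++ [x] = b :: (ys ++ [x]) by simp]
      rw [PySem.Chars.join_cons_cons, PySem.Chars.join_cons_cons]
      rw [show b :: (ys ++ [x]) = (b :: ys) ++ [x] by simp, ih]
      simp

theorem pv_emit_eq (ws : List (List Char)) (h : ws ≠ []) :
    pvEmit ws = PySem.Chars.join [' '] (ws.map pvPair) ++ [' '] := by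
  induction ws with
  | nil => exact absurd rfl h
  | cons w ws ih =>
    cases ws with
    | nil => simp [pvEmit, pvPair, PySem.Chars.join_singleton]
    | cons w' ws' =>
      rw [show (w :: w' :: ws').map pvPair = pvPair w :: pvPair w' :: ws'.map pvPair by simp,
        PySem.Chars.join_cons_cons]
      rw [show pvEmit (w :: w' :: ws') = [w.headD ' ', ' ', w.getLastD ' ', ' '] ++ pvEmit (w' :: ws') by simp [pvEmit]]
      rw [ih (by simp)]
      simp [pvPair]

theorem pv_lstrip_id (l : List Char) (h : ∀ c, l.head? = some c → PySem.Chars.isspace c = false) :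
    PySem.Chars.lstrip l = l := by
  cases l with
  | nil => rfl
  | cons a t => simp [PySem.Chars.lstrip, h a rfl]

theorem pv_rstrip_id (l : List Char) (h : ∀ c, l.getLast? = some c → PySem.Chars.isspace c = false) :
    PySem.Chars.rstrip l = l := by
  unfold PySem.Chars.rstrip
  cases hr : l.reverse with
  | nil => simp [List.reverse_eq_nil_iff.1 hr]
  | cons a t =>
    have ha : l.getLast? = some a := by
      rw [← List.head?_reverse, hr]; rfl
    rw [List.dropWhile_cons, h a ha]
    simp [← hr]

theorem pv_rstrip_space (l : List Char) :
    PySem.Chars.rstrip (l ++ [' ']) = PySem.Chars.rstrip l := by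
  unfold PySem.Chars.rstrip
  rw [List.reverse_append]
  simp [show PySem.Chars.isspace ' ' = true from rfl]

theorem pv_join_ne_nil (ws : List (List Char)) (h : ws ≠ []) :
    PySem.Chars.join [' '] (ws.map pvPair) ≠ [] := by
  cases ws with
  | nil => exact absurd rfl h
  | cons w ws' =>
    cases ws' with
    | nil => simp [PySem.Chars.join_singleton, pvPair]
    | cons w' ws'' =>
      rw [show (w :: w' :: ws'').map pvPair = pvPair w :: pvPair w' :: ws''.map pvPair by simp,
        PySem.Chars.join_cons_cons]
      simp [pvPair]

-- the join of the pair-strings of a good, nonempty word list starts and ends with an alnum char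
theorem pv_join_shape (ws : List (List Char)) (hg : pvGoodW ws) (h : ws ≠ []) :
    (∀ c, (PySem.Chars.join [' '] (ws.map pvPair)).head? = some c → PySem.Chars.isalnum c = true) ∧
    (∀ c, (PySem.Chars.join [' '] (ws.map pvPair)).getLast? = some c → PySem.Chars.isalnum c = true) := by
  constructor
  · -- head: first char of pvPair of the first word
    cases ws with
    | nil => exact absurd rfl h
    | cons w ws' =>
      have hw := hg w (by simp)
      have hhead : ∀ c, (pvPair w).head? = some c → PySem.Chars.isalnum c = true := by
        intro c hc
        simp [pvPair] at hc
        subst hc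
        cases w with
        | nil => exact absurd rfl hw.1
        | cons a t => exact hw.2 a (by simp)
      cases ws' with
      | nil =>
        intro c hc
        rw [show (w :: ([] : List (List Char))).map pvPair = [pvPair w] by simp,
          PySem.Chars.join_singleton] at hc
        exact hhead c hc
      | cons w' ws'' =>
        intro c hc
        rw [show (w :: w' :: ws'').map pvPair = pvPair w :: pvPair w' :: ws''.map pvPair by simp,
          PySem.Chars.join_cons_cons] at hc
        rw [show pvPair w ++ [' '] ++ PySem.Chars.join [' '] (pvPair w' :: ws''.map pvPair)
            = pvPair w ++ ([' '] ++ PySem.Chars.join [' '] (pvPair w' :: ws''.map pvPair)) by simp] at hc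
        rw [List.head?_append_of_ne_nil _ (by simp [pvPair])] at hc
        exact hhead c hc
  · -- last: last char of pvPair of the last word
    obtain ⟨ws₀, wl, rfl⟩ := (List.eq_nil_or_concat ws).resolve_left h
    rw [List.concat_eq_append] at *
    have hw := hg wl (by simp)
    have hlast : ∀ c, (pvPair wl).getLast? = some c → PySem.Chars.isalnum c = true := by
      intro c hc
      simp [pvPair] at hc
      subst hc
      cases w : wl with
      | nil => exact absurd w hw.1
      | cons a t =>
        subst w
        cases hgl : (a :: t).getLast? with
        | none => simp at hgl
        | some b =>
          simp only [Option.getD_some]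
          exact hw.2 b (List.mem_of_getLast? hgl)
    intro c hc
    rw [show (ws₀ ++ [wl]).map pvPair = ws₀.map pvPair ++ [pvPair wl] by simp,
      pv_join_snoc] at hc
    split at hc
    · exact hlast c hc
    · rw [show PySem.Chars.join [' '] (ws₀.map pvPair) ++ [' '] ++ pvPair wl
          = (PySem.Chars.join [' '] (ws₀.map pvPair) ++ [' ']) ++ pvPair wl by simp,
        List.getLast?_append_of_ne_nil _ (by simp [pvPair])] at hc
      exact hlast c hc

theorem pv_strip_id (l : List Char)
    (h1 : ∀ c, l.head? = some c → PySem.Chars.isspace c = false)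
    (h2 : ∀ c, l.getLast? = some c → PySem.Chars.isspace c = false) :
    PySem.Chars.strip l = l := by
  unfold PySem.Chars.strip
  rw [pv_lstrip_id l h1, pv_rstrip_id l h2]

-- ===== VERDICT (by name: the statement is the Claim_ definition above) =====
theorem primul_ultimul_caracter_spec : Claim_equal_primul_ultimul_caracter := by
  intro s _
  unfold Spec_primul_ultimul_caracter primul_ultimul_caracter primul_ultimul_caracter_alt pvWords
  obtain ⟨P', U', hfold, hPU⟩ := pv_loop_inv s.toList [] [] [] [] (by simp)
  obtain ⟨hgw, hgc⟩ := pv_good_inv s.toList [] [] (by simp [pvGoodW]) (by simp)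
  set st := s.toList.foldl pvBStep ([], [])
  rw [show pvEmit [] = [] from rfl] at hfold
  rw [show (([] : List Char)).isEmpty = true from rfl] at hfold
  simp only [hfold]
  congr 1
  by_cases hcur : st.2 = []
  · -- no open word at the end
    rw [hcur]
    rw [if_neg (by simp), if_neg (by simp)]
    by_cases hws : st.1 = []
    · simp [hws, pvEmit, PySem.Chars.join_nil, PySem.Chars.strip, PySem.Chars.lstrip,
        PySem.Chars.rstrip]
    · rw [pv_emit_eq st.1 hws]
      obtain ⟨hh, hl⟩ := pv_join_shape st.1 hgw hws
      have hJne : PySem.Chars.join [' '] (st.1.map pvPair) ≠ [] := pv_join_ne_nil st.1 hws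
      unfold PySem.Chars.strip
      rw [pv_lstrip_id _ (by
        intro c hc
        rw [List.head?_append_of_ne_nil _ hJne] at hc
        exact pv_alnum_not_space (hh c hc)),
        pv_rstrip_space, pv_rstrip_id _ (fun c hc => pv_alnum_not_space (hl c hc))]
  · -- an open word st.2 remains: A appends "primul + ' ' + ultimul", B appends the word
    obtain ⟨hP, hU⟩ := hPU hcur
    simp only [if_pos hcur]
    rw [show st.2.isEmpty = false by simpa [List.isEmpty_iff] using hcur]
    simp only [Bool.not_false, hP, hU]
    have hIsPair : pvEmit st.1 ++ [st.2.headD ' '] ++ [' '] ++ [st.2.getLastD ' ']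
        = PySem.Chars.join [' '] ((st.1 ++ [st.2]).map pvPair) := by
      rw [show (st.1 ++ [st.2]).map pvPair = st.1.map pvPair ++ [pvPair st.2] by simp,
        pv_join_snoc]
      by_cases hws : st.1 = []
      · simp [hws, pvEmit, pvPair]
      · rw [if_neg (by simpa using hws), pv_emit_eq st.1 hws]
        simp [pvPair]
    rw [hIsPair]
    have hgood : pvGoodW (st.1 ++ [st.2]) := by
      intro w hw
      rcases List.mem_append.1 hw with h | h
      · exact hgw w h
      · rw [List.mem_singleton.1 h]; exact ⟨hcur, hgc⟩
    obtain ⟨hh, hl⟩ := pv_join_shape (st.1 ++ [st.2]) hgood (by simp)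
    exact pv_strip_id _ (fun c hc => pv_alnum_not_space (hh c hc))
      (fun c hc => pv_alnum_not_space (hl c hc))
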